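-- pv_equiv track=rewrite | github.com/AlexTelon/AdventOfCode | 2019/10/part2.py | possible_positions
-- ===== SOURCE A (Python) =====
-- def possible_positions(slope):
--     x_min = 0
--     x_max = 100
--     if slope[0] < 0:
--         x_max = -x_max
--
--     y_min = 0
--     y_max = 100
--     if slope[1] < 0:
--         y_max = -y_max
--
--     if slope[0] == 0:
--         x = 0
--         for y in range(y_min, y_max, slope[1]):
--             yield (x,y)
--         return
--
--     if slope[1] == 0:
--         y = 0
--         for x in range(x_min, x_max, slope[0]):
--             yield (x,y)
--         return
--
--     for x, y in zip(range(x_min, x_max, slope[0]), range(y_min, y_max, slope[1])):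
--         yield (x,y)
-- ===== SOURCE B (Python) =====
-- def possible_positions(slope):
--     sx, sy = slope
--     n = min((100 + abs(s) - 1) // abs(s) for s in (sx, sy) if s != 0)
--     for k in range(n):
--         yield (k * sx, k * sy)
-- ===== Notes on version B (the rewrite author's own statement) =====
-- stated objective: simpler
-- what changed: Replaces A's three branches (two axis-aligned range loops and a zip of two stepped ranges) with a single index loop over the minimum of the per-axis ceil(100/|s|) step counts, computing both coordinates by multiplication.
-- outside the precondition, e.g. on possible_positions((0, 0)): A raises ValueError, B raises ValueError
import Mathlib
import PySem

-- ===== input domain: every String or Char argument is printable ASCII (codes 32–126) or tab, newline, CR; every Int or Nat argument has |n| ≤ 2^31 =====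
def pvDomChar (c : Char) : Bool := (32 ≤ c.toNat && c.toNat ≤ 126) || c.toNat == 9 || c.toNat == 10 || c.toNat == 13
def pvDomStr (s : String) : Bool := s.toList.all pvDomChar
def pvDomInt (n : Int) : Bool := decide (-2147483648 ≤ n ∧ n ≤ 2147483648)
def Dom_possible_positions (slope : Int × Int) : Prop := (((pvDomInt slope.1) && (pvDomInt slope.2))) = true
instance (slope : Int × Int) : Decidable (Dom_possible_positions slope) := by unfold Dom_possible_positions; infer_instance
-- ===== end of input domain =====

-- ===== PORT A =====
-- B replaces A's three range/zip branches by one index loop over the min of the per-axis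
-- step counts (objective: simpler). Both raise ValueError at slope = (0,0), excluded by Pre_.
def possible_positions (slope : Int × Int) : List (Int × Int) :=
  let x_max : Int := if slope.1 < 0 then -100 else 100
  let y_max : Int := if slope.2 < 0 then -100 else 100
  if slope.1 = 0 then
    (PySem.List.pyRange 0 y_max slope.2).map (fun y => ((0 : Int), y))
  else if slope.2 = 0 then
    (PySem.List.pyRange 0 x_max slope.1).map (fun x => (x, (0 : Int)))
  else
    (PySem.List.pyRange 0 x_max slope.1).zip (PySem.List.pyRange 0 y_max slope.2)

-- ===== PORT B =====
def possible_positions_alt (slope : Int × Int) : List (Int × Int) :=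
  let counts := ([slope.1, slope.2].filter (fun s => decide (s ≠ 0))).map
    (fun s => PySem.Int.floordiv (100 + |s| - 1) |s|)
  match PySem.List.min? counts (fun c => c) with
  | some n => (PySem.List.pyRange 0 n 1).map (fun k => (k * slope.1, k * slope.2))
  | none => []   -- unreachable under Pre_: Python raises ValueError here (min of empty)

-- ===== PRECONDITION & SPEC =====
-- Pre_ excludes only slope = (0, 0), where A raises ValueError (range() step 0).
def Pre_possible_positions (slope : Int × Int) : Prop := ¬ (slope.1 = 0 ∧ slope.2 = 0)
instance (slope : Int × Int) : Decidable (Pre_possible_positions slope) := by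
  unfold Pre_possible_positions; infer_instance
def pvWitness_possible_positions : (Int × Int) := (2, -3)
def Spec_possible_positions (slope : Int × Int) (out : List (Int × Int)) : Prop := out = possible_positions_alt slope
instance (slope : Int × Int) (out : List (Int × Int)) : Decidable (Spec_possible_positions slope out) := by unfold Spec_possible_positions; infer_instance

-- ===== CLAIM (what is proved, stated in full; the proofs are below) =====
def Claim_equal_possible_positions : Prop := ∀ (slope : Int × Int), Dom_possible_positions slope → Pre_possible_positions slope → Spec_possible_positions slope (possible_positions slope)

-- ===== LEMMAS AND PROOFS =====

-- count of steps along one axis: ceil(100/|s|)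
def pvCnt (s : Int) : Nat := ((100 + |s| - 1) / |s|).toNat

theorem pvCnt_int_pos (s : Int) (hs : s ≠ 0) : 0 < (100 + |s| - 1) / |s| := by
  have h1 : (1 : Int) ≤ |s| := by
    have := abs_pos.mpr hs; omega
  have : (1 : Int) ≤ (100 + |s| - 1) / |s| := by
    rw [Int.le_ediv_iff_mul_le (by omega)]
    omega
  omega

theorem pvRangeA (s : Int) (hs : s ≠ 0) :
    PySem.List.pyRange 0 (if s < 0 then (-100 : Int) else 100) s
      = (List.range (pvCnt s)).map (fun k : Nat => s * (k : Int)) := by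
  rcases lt_trichotomy s 0 with h | h | h
  · simp only [if_pos h, PySem.List.pyRange, if_neg hs, if_neg (by omega : ¬ 0 < s),
      if_pos (by omega : (-100 : Int) < 0), pvCnt, abs_of_neg h]
    norm_num
  · exact absurd h hs
  · rw [if_neg (by omega : ¬ s < 0), PySem.List.pyRange_of_pos 0 100 h]
    simp only [if_pos (by omega : (0 : Int) < 100), pvCnt, abs_of_pos h]
    norm_num

theorem pvCnt_toNat (s : Int) : ((100 + |s| - 1) / |s|).toNat = pvCnt s := rfl

theorem pvAltCount (s : Int) (hs : s ≠ 0) :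
    PySem.Int.floordiv (100 + |s| - 1) |s| = (100 + |s| - 1) / |s| :=
  PySem.Int.floordiv_eq_ediv_of_pos (abs_pos.mpr hs)

theorem pvZipMapRange {α β : Type} (f : Nat → α) (g : Nat → β) (n m : Nat) :
    ((List.range n).map f).zip ((List.range m).map g)
      = (List.range (min n m)).map (fun k => (f k, g k)) := by
  apply List.ext_getElem
  · simp
  · intro i h1 h2
    simp_all [List.getElem_zip]

theorem pvRangeB (n : Int) (_hn : 0 < n) :
    PySem.List.pyRange 0 n 1 = (List.range n.toNat).map (fun k : Nat => (k : Int)) := by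
  rw [PySem.List.pyRange_one]
  simp

-- ===== VERDICT (by name: the statement is the Claim_ definition above) =====
theorem possible_positions_spec : Claim_equal_possible_positions := by
  intro slope _ hpre
  obtain ⟨sx, sy⟩ := slope
  unfold Spec_possible_positions possible_positions possible_positions_alt
  simp only [Pre_possible_positions] at hpre
  by_cases hx : sx = 0
  · have hy : sy ≠ 0 := fun h => hpre ⟨hx, h⟩
    subst hx
    simp only [if_true]
    rw [pvRangeA sy hy]
    have hf : ([(0 : Int), sy].filter (fun s => decide (s ≠ 0))) = [sy] := by simp [hy]
    rw [hf]
    simp only [List.map_cons, List.map_nil]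
    rw [PySem.List.min?_id_cons, List.foldl_nil, pvAltCount sy hy]
    simp only [pvRangeB _ (pvCnt_int_pos sy hy), pvCnt_toNat]
    simp only [List.map_map]
    congr 1
    funext k
    simp [mul_comm]
  · by_cases hy : sy = 0
    · subst hy
      simp only
      rw [if_neg hx]
      simp only [if_true]
      rw [pvRangeA sx hx]
      have hf : ([sx, (0 : Int)].filter (fun s => decide (s ≠ 0))) = [sx] := by simp [hx]
      rw [hf]
      simp only [List.map_cons, List.map_nil]
      rw [PySem.List.min?_id_cons, List.foldl_nil, pvAltCount sx hx]
      simp only [pvRangeB _ (pvCnt_int_pos sx hx), pvCnt_toNat]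
      simp only [List.map_map]
      congr 1
      funext k
      simp [mul_comm]
    · simp only
      rw [if_neg hx, if_neg hy, pvRangeA sx hx, pvRangeA sy hy, pvZipMapRange]
      have hf : ([sx, sy].filter (fun s => decide (s ≠ 0))) = [sx, sy] := by simp [hx, hy]
      rw [hf]
      simp only [List.map_cons, List.map_nil]
      rw [PySem.List.min?_id_cons, List.foldl_cons, List.foldl_nil,
        pvAltCount sx hx, pvAltCount sy hy]
      have hmin : (0 : Int) < min ((100 + |sx| - 1) / |sx|) ((100 + |sy| - 1) / |sy|) :=
        lt_min (pvCnt_int_pos sx hx) (pvCnt_int_pos sy hy)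
      simp only [pvRangeB _ hmin]
      have htoNat : (min ((100 + |sx| - 1) / |sx|) ((100 + |sy| - 1) / |sy|)).toNat
          = min (pvCnt sx) (pvCnt sy) := by
        have h1 := pvCnt_int_pos sx hx
        have h2 := pvCnt_int_pos sy hy
        simp only [pvCnt]
        omega
      rw [htoNat]
      simp only [List.map_map]
      congr 1
      funext k
      simp [mul_comm]
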